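-- pv_equiv track=rewrite | github.com/LukhasAI/Lukhas | candidate/core/interfaces/api/v1/rest/middleware.py | _infer_tier_from_prefix
-- ===== SOURCE A (Python) =====
-- def _infer_tier_from_prefix(api_key: str) -> int:
--     """Infer tier from historical prefix patterns when no registry is configured."""
--
--     prefix_mapping: dict[str, int] = {
--         "sk_live_admin_": 4,
--         "sk_live_pro_": 3,
--         "sk_live_std_": 2,
--         "sk_live_": 1,
--     }
--
--     for prefix, tier in prefix_mapping.items():
--         if api_key.startswith(prefix):
--             return tier
--
--     return 0
-- ===== SOURCE B (Python) =====
-- def _infer_tier_from_prefix(api_key: str) -> int: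
--     """Infer tier from historical prefix patterns when no registry is configured."""
--     parts = api_key.split("_")
--     if len(parts) < 3 or parts[0] != "sk" or parts[1] != "live":
--         return 0
--     if len(parts) == 3:
--         return 1
--     return {"admin": 4, "pro": 3, "std": 2}.get(parts[2], 1)
-- ===== Notes on version B (the rewrite author's own statement) =====
-- stated objective: alternative
-- what changed: B tokenises the key once on the underscore separator and classifies the third token via a dictionary lookup, instead of A's ordered scan testing four full prefixes with startswith.
import Mathlib
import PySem

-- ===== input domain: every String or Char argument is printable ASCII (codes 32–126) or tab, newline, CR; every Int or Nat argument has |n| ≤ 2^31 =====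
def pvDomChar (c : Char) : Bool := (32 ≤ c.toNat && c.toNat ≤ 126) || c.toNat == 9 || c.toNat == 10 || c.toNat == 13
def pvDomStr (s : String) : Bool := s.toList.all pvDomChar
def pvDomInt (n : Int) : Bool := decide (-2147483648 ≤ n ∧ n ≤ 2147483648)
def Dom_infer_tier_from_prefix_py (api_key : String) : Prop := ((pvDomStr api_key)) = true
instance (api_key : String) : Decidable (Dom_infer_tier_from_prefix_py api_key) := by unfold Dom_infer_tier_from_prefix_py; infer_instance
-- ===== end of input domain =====

-- B tokenises the key on the underscore separator and classifies the third token by dictionary lookup,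
-- instead of A's ordered scan of four full prefixes (objective: alternative decomposition).

-- ===== PORT A =====
-- the for-loop over prefix_mapping.items(): return the tier of the first matching prefix, else 0
def pvScanPrefixes (api_key : String) : List (String × Int) → Int
  | [] => 0
  | (prefix_, tier) :: rest =>
      if PySem.Str.startswith api_key prefix_ then tier else pvScanPrefixes api_key rest

def infer_tier_from_prefix_py (api_key : String) : Int :=
  let prefix_mapping : List (String × Int) :=
    [("sk_live_admin_", 4), ("sk_live_pro_", 3), ("sk_live_std_", 2), ("sk_live_", 1)]
  pvScanPrefixes api_key prefix_mapping

-- ===== PORT B =====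
-- parts = api_key.split(sep); guard on the first two tokens, then dict-lookup the third.
-- parts[i] is read with getD: the length guards make the index in range exactly as in Source B.
def infer_tier_from_prefix_py_alt (api_key : String) : Int :=
  let parts := PySem.Chars.splitOn api_key.toList "_".toList
  if parts.length < 3 ∨ parts.getD 0 [] ≠ "sk".toList ∨ parts.getD 1 [] ≠ "live".toList then 0
  else if parts.length = 3 then 1
  else PySem.Dict.getD
    (PySem.Dict.mk [("admin".toList, (4 : Int)), ("pro".toList, 3), ("std".toList, 2)])
    (parts.getD 2 []) 1

-- ===== PRECONDITION & SPEC =====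
def Spec_infer_tier_from_prefix_py (api_key : String) (out : Int) : Prop := out = infer_tier_from_prefix_py_alt api_key
instance (api_key : String) (out : Int) : Decidable (Spec_infer_tier_from_prefix_py api_key out) := by unfold Spec_infer_tier_from_prefix_py; infer_instance

-- ===== CLAIM (what is proved, stated in full; the proofs are below) =====
def Claim_equal_infer_tier_from_prefix_py : Prop := ∀ (api_key : String), Dom_infer_tier_from_prefix_py api_key → Spec_infer_tier_from_prefix_py api_key (infer_tier_from_prefix_py api_key)

-- ===== LEMMAS AND PROOFS =====

-- reference version of split on the single separator '_', structural on the list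
def mySplit : List Char → List (List Char)
  | [] => [[]]
  | c :: t => if c = '_' then [] :: mySplit t else (mySplit t).modifyHead (c :: ·)

theorem mySplit_ne_nil (l : List Char) : mySplit l ≠ [] := by
  induction l with
  | nil => simp [mySplit]
  | cons c t ih =>
    simp only [mySplit]
    split_ifs
    · simp
    · cases h : mySplit t <;> simp_all [List.modifyHead]

theorem go_spec : ∀ (fuel : Nat) (l cur : List Char) (acc : List (List Char)),
    l.length < fuel →
    PySem.Chars.splitOn.go ['_'] fuel l cur acc
      = acc.reverse ++ (mySplit l).modifyHead (cur.reverse ++ ·) := by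
  intro fuel
  induction fuel with
  | zero => intro l cur acc h; omega
  | succ f ih =>
    intro l cur acc h
    cases l with
    | nil => simp [PySem.Chars.splitOn.go, mySplit]
    | cons c rest =>
      rw [PySem.Chars.splitOn.go]
      by_cases hc : c = '_'
      · subst hc
        rw [if_pos (by simp [List.isPrefixOf])]
        rw [ih _ _ _ (by simp at h ⊢; omega)]
        obtain ⟨x, xs, hx⟩ := List.exists_cons_of_ne_nil (mySplit_ne_nil rest)
        simp [mySplit, hx, List.modifyHead]
      · rw [if_neg (by simp [List.isPrefixOf, Ne.symm hc])]
        rw [ih _ _ _ (by simp at h ⊢; omega)]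
        obtain ⟨x, xs, hx⟩ := List.exists_cons_of_ne_nil (mySplit_ne_nil rest)
        simp [mySplit, hc, hx, List.modifyHead]

theorem splitOn_eq_mySplit (l : List Char) :
    PySem.Chars.splitOn l ['_'] = mySplit l := by
  rw [PySem.Chars.splitOn, go_spec _ _ _ _ (by omega)]
  obtain ⟨x, xs, hx⟩ := List.exists_cons_of_ne_nil (mySplit_ne_nil l)
  simp [hx, List.modifyHead]

-- peeling one '_'-free word followed by '_' off the front of a split
theorem mySplit_word_append (w t : List Char) (hw : '_' ∉ w) :
    mySplit (w ++ '_' :: t) = w :: mySplit t := by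
  induction w with
  | nil => simp [mySplit]
  | cons c w' ih =>
    have hc : c ≠ '_' := by intro h; exact hw (by simp [h])
    have hw' : '_' ∉ w' := fun h => hw (by simp [h])
    simp [mySplit, hc, ih hw', List.modifyHead]

theorem mySplit_head (l : List Char) :
    (mySplit l).getD 0 [] = l.takeWhile (· ≠ '_') := by
  induction l with
  | nil => simp [mySplit]
  | cons c t ih =>
    by_cases hc : c = '_'
    · simp [mySplit, hc, List.takeWhile]
    · obtain ⟨x, xs, hx⟩ := List.exists_cons_of_ne_nil (mySplit_ne_nil t)
      simp [mySplit, hc, hx, List.modifyHead]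
      simpa [hx] using ih

theorem mySplit_length_ge_two_iff (l : List Char) :
    2 ≤ (mySplit l).length ↔ '_' ∈ l := by
  induction l with
  | nil => simp [mySplit]
  | cons c t ih =>
    by_cases hc : c = '_'
    · have := List.length_pos_iff.mpr (mySplit_ne_nil t)
      simp [mySplit, hc]; omega
    · obtain ⟨x, xs, hx⟩ := List.exists_cons_of_ne_nil (mySplit_ne_nil t)
      simp only [mySplit, if_neg hc, hx, List.modifyHead, List.length_cons, List.mem_cons]
      rw [hx] at ih; simp only [List.length_cons] at ih
      constructor
      · intro hlen2; right; exact ih.mp (by omega)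
      · rintro (h' | h')
        · exact absurd h'.symm hc
        · have := ih.mpr h'; omega

-- decomposition at the first '_' when one exists
theorem mySplit_decomp (l : List Char) (h : '_' ∈ l) :
    l = l.takeWhile (· ≠ '_') ++ '_' :: (l.dropWhile (· ≠ '_')).tail ∧
    mySplit l = l.takeWhile (· ≠ '_') :: mySplit ((l.dropWhile (· ≠ '_')).tail) := by
  have hne : l.dropWhile (· ≠ '_') ≠ [] := by
    intro hnil
    have : l.takeWhile (· ≠ '_') = l := by
      have := List.takeWhile_append_dropWhile (p := (· ≠ '_')) (l := l)
      rw [hnil] at this; simpa using this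
    have := List.mem_takeWhile_imp (l := l) (p := (· ≠ '_')) (this ▸ h)
    simp at this
  obtain ⟨d, ds, hd⟩ := List.exists_cons_of_ne_nil hne
  have hdhead : d = '_' := by
    have h1 := List.head_dropWhile_not (p := (· ≠ '_')) (l := l) hne
    have h2 : (l.dropWhile (· ≠ '_')).head? = some d := by rw [hd]; rfl
    rw [List.head?_eq_some_head hne] at h2
    simp only [Option.some.injEq] at h2
    rw [h2] at h1; simpa using h1
  have hdec : l = l.takeWhile (· ≠ '_') ++ '_' :: (l.dropWhile (· ≠ '_')).tail := by
    conv_lhs => rw [← List.takeWhile_append_dropWhile (p := (· ≠ '_')) (l := l)]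
    rw [hd, hdhead]; simp
  refine ⟨hdec, ?_⟩
  conv_lhs => rw [hdec]
  exact mySplit_word_append _ _ (by
    intro hmem
    have := List.mem_takeWhile_imp hmem
    simp at this)

-- takeWhile on a word followed by '_' is the word itself
theorem takeWhile_word (w t : List Char) (hw : '_' ∉ w) :
    (w ++ '_' :: t).takeWhile (· ≠ '_') = w := by
  induction w with
  | nil => simp [List.takeWhile]
  | cons c w' ih =>
    have hc : c ≠ '_' := fun h => hw (by simp [h])
    have hw' : '_' ∉ w' := fun h => hw (by simp [h])
    simpa [hc] using ih hw'

-- the chars-level statement tying the two algorithms together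
theorem main_chars (l : List Char) :
    (if (mySplit l).length < 3 ∨ (mySplit l).getD 0 [] ≠ "sk".toList ∨ (mySplit l).getD 1 [] ≠ "live".toList then 0
     else if (mySplit l).length = 3 then 1
     else PySem.Dict.getD
       (PySem.Dict.mk [("admin".toList, (4 : Int)), ("pro".toList, 3), ("std".toList, 2)])
       ((mySplit l).getD 2 []) 1)
    = (if PySem.Chars.startswith l "sk_live_".toList then
         (if PySem.Chars.startswith (l.drop 8) "admin_".toList then 4
          else if PySem.Chars.startswith (l.drop 8) "pro_".toList then 3
          else if PySem.Chars.startswith (l.drop 8) "std_".toList then 2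
          else 1)
       else 0) := by
  have hL : "sk_live_".toList = ['s','k','_','l','i','v','e','_'] := by decide
  by_cases hsw : PySem.Chars.startswith l "sk_live_".toList
  · obtain ⟨t, ht⟩ := (PySem.Chars.startswith_iff _ _).mp hsw
    have hl : l = ['s','k'] ++ '_' :: (['l','i','v','e'] ++ '_' :: t) := by
      rw [← ht, hL]; rfl
    have hms : mySplit l = ['s','k'] :: ['l','i','v','e'] :: mySplit t := by
      rw [hl, mySplit_word_append _ _ (by decide), mySplit_word_append _ _ (by decide)]
    have hdrop : l.drop 8 = t := by rw [hl]; rfl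
    have hpos : 1 ≤ (mySplit t).length := List.length_pos_iff.mpr (mySplit_ne_nil t)
    rw [if_pos hsw, hms, hdrop]
    rw [if_neg (by simp [show "sk".toList = ['s','k'] from by decide,
        show "live".toList = ['l','i','v','e'] from by decide]; omega)]
    by_cases hu : '_' ∈ t
    · have h2 : 2 ≤ (mySplit t).length := (mySplit_length_ge_two_iff t).mpr hu
      rw [if_neg (by simp; omega)]
      have hget2 : (['s','k'] :: ['l','i','v','e'] :: mySplit t).getD 2 [] = t.takeWhile (· ≠ '_') := by
        simpa using mySplit_head t
      rw [hget2]
      have tw_iff : ∀ w : List Char, '_' ∉ w →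
          (t.takeWhile (· ≠ '_') = w ↔ PySem.Chars.startswith t (w ++ ['_']) = true) := by
        intro w hw
        constructor
        · intro htw
          obtain ⟨hdec, -⟩ := mySplit_decomp t hu
          rw [htw] at hdec
          exact (PySem.Chars.startswith_iff _ _).mpr
            ⟨(t.dropWhile (· ≠ '_')).tail, by
              conv_rhs => rw [hdec]
              simp⟩
        · intro hst
          obtain ⟨r, hr⟩ := (PySem.Chars.startswith_iff _ _).mp hst
          rw [← hr, List.append_assoc]
          exact takeWhile_word _ _ hw
      have hA := tw_iff "admin".toList (by decide)
      have hP := tw_iff "pro".toList (by decide)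
      have hS := tw_iff "std".toList (by decide)
      have eA : "admin_".toList = "admin".toList ++ ['_'] := by decide
      have eP : "pro_".toList = "pro".toList ++ ['_'] := by decide
      have eS : "std_".toList = "std".toList ++ ['_'] := by decide
      rw [eA, eP, eS]
      simp only [PySem.Dict.getD_eq_get?_getD, PySem.Dict.get?_mk_cons]
      by_cases ha : t.takeWhile (· ≠ '_') = "admin".toList
      · rw [if_pos (hA.mp ha), if_pos (by rw [beq_iff_eq]; exact ha.symm)]
        rfl
      · rw [if_neg (fun h => ha (hA.mpr h)),
            if_neg (by rw [beq_iff_eq]; exact fun h => ha h.symm)]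
        by_cases hp : t.takeWhile (· ≠ '_') = "pro".toList
        · rw [if_pos (hP.mp hp), if_pos (by rw [beq_iff_eq]; exact hp.symm)]
          rfl
        · rw [if_neg (fun h => hp (hP.mpr h)),
              if_neg (by rw [beq_iff_eq]; exact fun h => hp h.symm)]
          by_cases hs : t.takeWhile (· ≠ '_') = "std".toList
          · rw [if_pos (hS.mp hs), if_pos (by rw [beq_iff_eq]; exact hs.symm)]
            rfl
          · rw [if_neg (fun h => hs (hS.mpr h)),
                if_neg (by rw [beq_iff_eq]; exact fun h => hs h.symm)]
            rfl
    · have h1 : (mySplit t).length = 1 := by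
        have := (mySplit_length_ge_two_iff t).not.mpr hu
        omega
      rw [if_pos (by simp [h1])]
      have noPre : ∀ w : List Char, '_' ∈ w → PySem.Chars.startswith t w = false := by
        intro w hw
        cases hx : PySem.Chars.startswith t w with
        | false => rfl
        | true =>
          obtain ⟨r, hr⟩ := (PySem.Chars.startswith_iff _ _).mp hx
          exact absurd (by rw [← hr]; exact List.mem_append_left _ hw) hu
      rw [noPre _ (by decide), noPre _ (by decide), noPre _ (by decide)]
      rfl
  · have hguard : (mySplit l).length < 3 ∨ (mySplit l).getD 0 [] ≠ "sk".toList ∨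
        (mySplit l).getD 1 [] ≠ "live".toList := by
      by_contra hg
      push Not at hg
      obtain ⟨hlen, hg0, hg1⟩ := hg
      have hu : '_' ∈ l := (mySplit_length_ge_two_iff l).mp (by omega)
      obtain ⟨hdec, hms⟩ := mySplit_decomp l hu
      rw [hms] at hg0
      simp only [List.getD_cons_zero] at hg0
      have hg1' : (mySplit ((l.dropWhile (· ≠ '_')).tail)).getD 0 [] = "live".toList := by
        rw [hms] at hg1; simpa using hg1
      have hlen1 : 2 ≤ (mySplit ((l.dropWhile (· ≠ '_')).tail)).length := by
        rw [hms] at hlen; simp only [List.length_cons] at hlen; omega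
      have hu1 : '_' ∈ (l.dropWhile (· ≠ '_')).tail :=
        (mySplit_length_ge_two_iff _).mp hlen1
      obtain ⟨hdec1, -⟩ := mySplit_decomp _ hu1
      rw [mySplit_head] at hg1'
      rw [hg1'] at hdec1
      apply hsw
      refine (PySem.Chars.startswith_iff _ _).mpr
        ⟨(((l.dropWhile (· ≠ '_')).tail).dropWhile (· ≠ '_')).tail, ?_⟩
      rw [hL]
      conv_rhs => rw [hdec, hg0, hdec1]
      rfl
    rw [if_pos hguard, if_neg hsw]

-- splitting a prefix test on a concatenation: p ++ q is a prefix of l iff p is and q is a prefix of the rest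
theorem pv_append_prefix_iff {α : Type} (l p q : List α) :
    (p ++ q) <+: l ↔ p <+: l ∧ q <+: l.drop p.length := by
  constructor
  · rintro ⟨t, rfl⟩
    refine ⟨⟨q ++ t, by simp⟩, ?_⟩
    rw [List.append_assoc, List.drop_left]
    exact ⟨t, rfl⟩
  · rintro ⟨⟨t1, rfl⟩, ⟨t2, h2⟩⟩
    rw [List.drop_left] at h2
    exact ⟨t2, by rw [List.append_assoc, h2]⟩

-- startswith on a concatenated prefix splits into two startswith tests (Bool form)
theorem pv_startswith_append (l p q : List Char) :
    PySem.Chars.startswith l (p ++ q)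
      = (PySem.Chars.startswith l p && PySem.Chars.startswith (l.drop p.length) q) := by
  by_cases h : (p ++ q) <+: l
  · have h' := (pv_append_prefix_iff l p q).mp h
    simp [(PySem.Chars.startswith_iff _ _).mpr h, (PySem.Chars.startswith_iff _ _).mpr h'.1,
      (PySem.Chars.startswith_iff _ _).mpr h'.2]
  · have h1 : PySem.Chars.startswith l (p ++ q) = false := by
      simp [← Bool.not_eq_true, PySem.Chars.startswith_iff, h]
    rw [h1]
    by_cases hp : p <+: l
    · have h2 : ¬ q <+: l.drop p.length := fun hq =>
        h ((pv_append_prefix_iff l p q).mpr ⟨hp, hq⟩)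
      simp [← Bool.not_eq_true, PySem.Chars.startswith_iff, h2]
    · simp [← Bool.not_eq_true, PySem.Chars.startswith_iff, hp]

-- ===== VERDICT (by name: the statement is the Claim_ definition above) =====
theorem infer_tier_from_prefix_py_spec : Claim_equal_infer_tier_from_prefix_py := by
  intro api_key _
  unfold Spec_infer_tier_from_prefix_py infer_tier_from_prefix_py infer_tier_from_prefix_py_alt
  have hsep : "_".toList = ['_'] := by decide
  have ea : "sk_live_admin_".toList = "sk_live_".toList ++ "admin_".toList := by decide
  have ep : "sk_live_pro_".toList = "sk_live_".toList ++ "pro_".toList := by decide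
  have es : "sk_live_std_".toList = "sk_live_".toList ++ "std_".toList := by decide
  have hlen : ("sk_live_".toList).length = 8 := by decide
  simp only [pvScanPrefixes, PySem.Str.startswith_eq, hsep, splitOn_eq_mySplit, ea, ep, es,
    pv_startswith_append, hlen]
  have := main_chars api_key.toList
  cases hb8 : PySem.Chars.startswith api_key.toList "sk_live_".toList <;>
    cases hba : PySem.Chars.startswith (api_key.toList.drop 8) "admin_".toList <;>
      cases hbp : PySem.Chars.startswith (api_key.toList.drop 8) "pro_".toList <;>
        cases hbs : PySem.Chars.startswith (api_key.toList.drop 8) "std_".toList <;>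
          simp_all
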